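-- pv_equiv track=rewrite | github.com/Jxun-h/BOJ | 백준/Silver/1802. 종이 접기/종이 접기.py | check
-- ===== SOURCE A (Python) =====
-- def check(str):
--     todo = list(str)
--
--     while len(todo) >= 3:
--         for i in range(2, len(todo), 2):
--             if todo[i-2] == todo[i]:
--                 return False
--
--         nextTodo = []
--         for i in range(1, len(todo), 2):
--             nextTodo.append(todo[i])
--
--         todo = nextTodo
--
--     return True
-- ===== SOURCE B (Python) =====
-- def check(str):
--     # One linear pass: element at index idx belongs to fold level k = (number of
--     # trailing zero bits of idx+1); within each level, adjacent elements must differ.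
--     last = {}
--     for idx, ch in enumerate(str):
--         n = idx + 1
--         k = 0
--         while n % 2 == 0:
--             n //= 2
--             k += 1
--         if last.get(k) == ch:
--             return False
--         last[k] = ch
--     return True
-- ===== Notes on version B (the rewrite author's own statement) =====
-- stated objective: faster
-- what changed: A repeatedly halves the list, checking adjacent equality at even positions in each pass; B makes a single left-to-right scan, bucketing each character by the 2-adic valuation of idx+1 and comparing it with the last character seen at that level (kept in a dict).
import Mathlib
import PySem

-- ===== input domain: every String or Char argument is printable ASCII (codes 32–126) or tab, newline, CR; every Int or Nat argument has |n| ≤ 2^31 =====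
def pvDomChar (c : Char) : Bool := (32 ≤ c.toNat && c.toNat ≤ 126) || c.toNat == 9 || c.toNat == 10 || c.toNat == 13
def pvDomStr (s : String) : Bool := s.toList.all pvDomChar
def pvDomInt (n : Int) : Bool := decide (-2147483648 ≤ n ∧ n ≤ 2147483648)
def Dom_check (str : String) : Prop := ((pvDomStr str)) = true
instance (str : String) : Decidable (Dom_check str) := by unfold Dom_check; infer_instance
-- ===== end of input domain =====

-- B replaces A's repeated halving passes by ONE linear scan keyed by the 2-adic
-- fold level of each index (a dict holds the last character seen at each level).

-- ===== PORT A =====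
-- cons/nil unfolding of range(a, b, 2) and a length bound; needed by the port's termination proof
theorem pyRange_two_nil (a b : Int) (h : b ≤ a) :
    PySem.List.pyRange a b 2 = [] := by
  rw [PySem.List.pyRange_of_pos a b (by norm_num)]
  rw [if_neg (by omega)]
  simp

theorem pyRange_two_cons (a b : Int) (h : a < b) :
    PySem.List.pyRange a b 2 = a :: PySem.List.pyRange (a + 2) b 2 := by
  rw [PySem.List.pyRange_of_pos a b (by norm_num),
      PySem.List.pyRange_of_pos (a + 2) b (by norm_num)]
  have hn : ((b - a + 2 - 1) / 2).toNat
      = (if a + 2 < b then ((b - (a + 2) + 2 - 1) / 2).toNat else 0) + 1 := by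
    split <;> omega
  rw [if_pos h, hn, List.range_succ_eq_map]
  simp only [List.map_cons, List.map_map, Nat.cast_zero, mul_zero, add_zero]
  congr 1
  apply List.map_congr_left
  intro k _
  simp only [Function.comp_apply, Nat.succ_eq_add_one]
  push_cast
  ring

theorem pyRange_two_length_le : ∀ (k : Nat) (a b : Int), b - a ≤ 2 * k →
    (PySem.List.pyRange a b 2).length ≤ k := by
  intro k
  induction k with
  | zero => intro a b h; rw [pyRange_two_nil a b (by omega)]; simp
  | succ k ih =>
    intro a b h
    by_cases hab : a < b
    · rw [pyRange_two_cons a b hab]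
      simp only [List.length_cons]
      have := ih (a + 2) b (by omega)
      omega
    · rw [pyRange_two_nil a b (by omega)]; simp

-- the length fact the port's 'decreasing_by' cites
theorem nextTodo_length_lt (l : List Char) (h : 3 ≤ l.length) :
    ((PySem.List.pyRange 1 (l.length : Int) 2).foldl
      (fun acc i => acc ++ [PySem.List.pyGetD l i ' ']) []).length < l.length := by
  rw [PySem.List.foldl_append_singleton_eq_map (fun i => PySem.List.pyGetD l i ' ')]
  simp only [List.nil_append, List.length_map]
  have := pyRange_two_length_le (l.length - 2) 1 (l.length : Int) (by omega)
  omega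

-- 'for i in range(2, len(todo), 2): if todo[i-2] == todo[i]: return False'
def innerAny (todo : List Char) : List Int → Bool
  | [] => false
  | i :: rest =>
      if PySem.List.pyGet? todo (i - 2) == PySem.List.pyGet? todo i then true
      else innerAny todo rest

-- the 'while len(todo) >= 3' loop of A
def checkTodo (todo : List Char) : Bool :=
  if h : 3 ≤ todo.length then
    if innerAny todo (PySem.List.pyRange 2 (todo.length : Int) 2) then false
    else checkTodo ((PySem.List.pyRange 1 (todo.length : Int) 2).foldl
      (fun acc i => acc ++ [PySem.List.pyGetD todo i ' ']) [])
  else true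
termination_by todo.length
decreasing_by exact nextTodo_length_lt todo h

def check (str : String) : Bool := checkTodo str.toList

-- ===== PORT B =====
-- 'while n % 2 == 0: n //= 2; k += 1'  (0 < n is a totality guard only: B runs it with n = idx+1 ≥ 1)
def tzLoop (n k : Nat) : Nat :=
  if h : n % 2 = 0 ∧ 0 < n then tzLoop (n / 2) (k + 1) else k
termination_by n
decreasing_by omega

-- the 'for idx, ch in enumerate(str)' loop with early return False
def altLoop (last : PySem.Dict Nat Char) (idx : Nat) : List Char → Bool
  | [] => true
  | ch :: rest =>
      let k := tzLoop (idx + 1) 0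
      if last.get? k == some ch then false
      else altLoop (last.insert k ch) (idx + 1) rest

def check_alt (str : String) : Bool := altLoop PySem.Dict.empty 0 str.toList

-- ===== PRECONDITION & SPEC =====
def Spec_check (str : String) (out : Bool) : Prop := out = check_alt str
instance (str : String) (out : Bool) : Decidable (Spec_check str out) := by unfold Spec_check; infer_instance

-- ===== CLAIM (what is proved, stated in full; the proofs are below) =====
def Claim_equal_check : Prop := ∀ (str : String), Dom_check str → Spec_check str (check str)

-- ===== LEMMAS AND PROOFS =====

-- no two adjacent equal characters, seeded with an optional previous character
def chain : Option Char → List Char → Bool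
  | _, [] => true
  | o, c :: cs => !(o == some c) && chain (some c) cs

-- elements at even positions 0,2,4,…
def evens : List Char → List Char
  | [] => []
  | [c] => [c]
  | c :: _ :: rest => c :: evens rest

-- elements at odd positions 1,3,5,…
def odds (l : List Char) : List Char := evens l.tail

-- level k of the fold: lev 0 = evens, lev (k+1) l = lev k (odds l)
def lev : Nat → List Char → List Char
  | 0, l => evens l
  | k + 1, l => lev k (odds l)

-- the characters of l (positions idx, idx+1, …) whose position p has tz(p+1) = k
def L (k : Nat) : Nat → List Char → List Char
  | _, [] => []
  | idx, c :: rest => if tzLoop (idx + 1) 0 = k then c :: L k (idx + 1) rest else L k (idx + 1) rest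

theorem tzLoop_shift (n : Nat) : ∀ k, tzLoop n (k + 1) = tzLoop n k + 1 := by
  induction n using Nat.strong_induction_on with
  | _ n ih =>
    intro k
    unfold tzLoop
    split
    · next h => exact ih (n / 2) (by omega) (k + 1)
    · rfl

theorem tz_odd (m : Nat) : tzLoop (2 * m + 1) 0 = 0 := by
  unfold tzLoop
  rw [dif_neg (by omega)]

theorem tz_even (m : Nat) : tzLoop (2 * m + 2) 0 = tzLoop (m + 1) 0 + 1 := by
  have h1 : tzLoop (2 * m + 2) 0 = tzLoop ((2 * m + 2) / 2) 1 := by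
    conv_lhs => rw [tzLoop]
    rw [dif_pos ⟨by omega, by omega⟩]
  rw [h1, show (2 * m + 2) / 2 = m + 1 by omega, tzLoop_shift]

theorem evens_cons (c : Char) (rest : List Char) : evens (c :: rest) = c :: odds rest := by
  cases rest <;> rfl

theorem odds_cons (c : Char) (rest : List Char) : odds (c :: rest) = evens rest := rfl

theorem L_zero : ∀ (l : List Char) (idx : Nat),
    L 0 idx l = if idx % 2 = 0 then evens l else odds l := by
  intro l
  induction l with
  | nil => intro idx; simp [L, evens, odds]
  | cons c rest ih =>
    intro idx
    by_cases h : idx % 2 = 0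
    · rw [if_pos h]
      have h1 : idx + 1 = 2 * (idx / 2) + 1 := by omega
      show (if tzLoop (idx + 1) 0 = 0 then c :: L 0 (idx + 1) rest else L 0 (idx + 1) rest) = _
      rw [h1, tz_odd, if_pos rfl, ← h1, ih (idx + 1), if_neg (by omega), evens_cons]
    · rw [if_neg h]
      have h1 : idx + 1 = 2 * ((idx - 1) / 2) + 2 := by omega
      show (if tzLoop (idx + 1) 0 = 0 then c :: L 0 (idx + 1) rest else L 0 (idx + 1) rest) = _
      rw [h1, tz_even, if_neg (by omega), ← h1, ih (idx + 1), if_pos (by omega), odds_cons]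

theorem L_succ : ∀ (l : List Char) (k m : Nat),
    L (k + 1) (2 * m) l = L k m (odds l) ∧ L (k + 1) (2 * m + 1) l = L k m (evens l) := by
  intro l
  induction l with
  | nil => intro k m; simp [L, evens, odds]
  | cons c rest ih =>
    intro k m
    constructor
    · show (if tzLoop (2 * m + 1) 0 = k + 1 then c :: L (k + 1) (2 * m + 1) rest
          else L (k + 1) (2 * m + 1) rest) = _
      rw [tz_odd, if_neg (by omega), odds_cons]
      exact (ih k m).2
    · show (if tzLoop (2 * m + 1 + 1) 0 = k + 1 then c :: L (k + 1) (2 * m + 1 + 1) rest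
          else L (k + 1) (2 * m + 1 + 1) rest) = _
      rw [evens_cons]
      have h2 : 2 * m + 1 + 1 = 2 * (m + 1) := by ring
      rw [show (2 * m + 1 + 1 : Nat) = 2 * m + 2 from rfl, tz_even]
      show _ = (if tzLoop (m + 1) 0 = k then c :: L k (m + 1) (odds rest) else L k (m + 1) (odds rest))
      by_cases h : tzLoop (m + 1) 0 = k
      · rw [if_pos (by omega), if_pos h]
        congr 1
        rw [show (2 * m + 2 : Nat) = 2 * (m + 1) from by ring]
        exact (ih k (m + 1)).1
      · rw [if_neg (by omega), if_neg h]
        rw [show (2 * m + 2 : Nat) = 2 * (m + 1) from by ring]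
        exact (ih k (m + 1)).1

theorem L_eq_lev : ∀ (k : Nat) (l : List Char), L k 0 l = lev k l := by
  intro k
  induction k with
  | zero => intro l; rw [L_zero l 0, if_pos (by omega)]; rfl
  | succ k ih =>
    intro l
    have := (L_succ l k 0).1
    rw [show (2 * 0 : Nat) = 0 from rfl] at this
    rw [this, ih (odds l)]
    rfl

theorem altLoop_iff : ∀ (l : List Char) (last : PySem.Dict Nat Char) (idx : Nat),
    altLoop last idx l = true ↔ ∀ k, chain (last.get? k) (L k idx l) = true := by
  intro l
  induction l with
  | nil => intro last idx; simp [altLoop, L, chain]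
  | cons c rest ih =>
    intro last idx
    show (if last.get? (tzLoop (idx + 1) 0) == some c then false
        else altLoop (last.insert (tzLoop (idx + 1) 0) c) (idx + 1) rest) = true ↔ _
    set t := tzLoop (idx + 1) 0 with ht
    by_cases h : last.get? t = some c
    · rw [if_pos (by simp [h])]
      simp only [Bool.false_eq_true, false_iff]
      intro hall
      have := hall t
      rw [show L t idx (c :: rest)
            = c :: L t (idx + 1) rest from by simp [L, ← ht]] at this
      simp [chain, h] at this
    · rw [if_neg (by simp [h]), ih]
      apply forall_congr'
      intro k
      by_cases hk : k = t
      · subst hk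
        rw [show L t idx (c :: rest) = c :: L t (idx + 1) rest from by simp [L, ← ht],
            PySem.Dict.get?_insert_self]
        show chain (some c) _ = true ↔ _
        simp [chain, h]
      · rw [show L k idx (c :: rest) = L k (idx + 1) rest from by simp [L, ← ht, Ne.symm hk],
            PySem.Dict.get?_insert_of_ne _ _ hk]

theorem chain_none_small (t : List Char) (h : t.length ≤ 1) : chain none t = true := by
  match t with
  | [] => rfl
  | [c] => simp [chain]
  | _ :: _ :: _ => simp at h

theorem evens_drop (l : List Char) (i : Nat) (h : i < l.length) :
    evens (l.drop i) = l[i] :: evens (l.drop (i + 2)) := by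
  rw [List.drop_eq_getElem_cons h]
  have ht : l.drop (i + 2) = (l.drop (i + 1)).tail := by
    rw [List.tail_drop]
  cases h2 : l.drop (i + 1) with
  | nil => rw [ht, h2]; rfl
  | cons d r =>
    rw [ht, h2]
    show evens (l[i] :: d :: r) = l[i] :: evens r
    rfl

theorem evens_small (t : List Char) (h : t.length ≤ 2) : (evens t).length ≤ 1 := by
  match t with
  | [] => simp [evens]
  | [c] => simp [evens]
  | [c, d] => simp [evens]
  | _ :: _ :: _ :: _ => simp at h

theorem innerAny_eq : ∀ (n : Nat) (l : List Char) (i : Nat), l.length ≤ i + n → 2 ≤ i →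
    innerAny l (PySem.List.pyRange (i : Int) (l.length : Int) 2)
      = !chain none (evens (l.drop (i - 2))) := by
  intro n
  induction n using Nat.strong_induction_on with
  | _ n ih =>
    intro l i hn h2
    by_cases hlt : i < l.length
    · rw [pyRange_two_cons _ _ (by exact_mod_cast hlt)]
      simp only [innerAny]
      rw [show ((i : Int) - 2) = ((i - 2 : Nat) : Int) from by omega,
          PySem.List.pyGet?_natCast, PySem.List.pyGet?_natCast,
          List.getElem?_eq_getElem (show i - 2 < l.length from by omega),
          List.getElem?_eq_getElem hlt,
          show ((i : Int) + 2) = (((i + 2 : Nat)) : Int) from by push_cast; ring,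
          ih (n - 1) (by omega) l (i + 2) (by omega) (by omega),
          show (i + 2) - 2 = i from by omega,
          evens_drop l (i - 2) (by omega), show i - 2 + 2 = i from by omega,
          evens_drop l i hlt]
      cases hbe : (l[i - 2] == l[i]) <;> simp [chain, hbe]
    · rw [pyRange_two_nil _ _ (by exact_mod_cast Nat.le_of_not_lt hlt)]
      rw [show innerAny l [] = false from rfl]
      rw [chain_none_small _ (evens_small _ (by simp; omega))]
      rfl

theorem map_pyRange_evens : ∀ (n : Nat) (l : List Char) (i : Nat), l.length ≤ i + n →
    (PySem.List.pyRange (i : Int) (l.length : Int) 2).map (fun j => PySem.List.pyGetD l j ' ')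
      = evens (l.drop i) := by
  intro n
  induction n using Nat.strong_induction_on with
  | _ n ih =>
    intro l i hn
    by_cases hlt : i < l.length
    · rw [pyRange_two_cons _ _ (by exact_mod_cast hlt)]
      simp only [List.map_cons]
      rw [PySem.List.pyGetD_natCast, List.getD_eq_getElem _ _ hlt,
          show ((i : Int) + 2) = (((i + 2 : Nat)) : Int) from by push_cast; ring,
          ih (n - 1) (by omega) l (i + 2) (by omega),
          evens_drop l i hlt]
    · rw [pyRange_two_nil _ _ (by exact_mod_cast Nat.le_of_not_lt hlt)]
      rw [List.drop_eq_nil_of_le (by omega)]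
      rfl

theorem odds_eq_evens_drop (l : List Char) : odds l = evens (l.drop 1) := by
  rw [List.drop_one]; rfl

theorem odds_small (l : List Char) (h : l.length ≤ 2) : (odds l).length ≤ 2 := by
  have := evens_small l.tail (by simp [List.length_tail]; omega)
  show (evens l.tail).length ≤ 2
  omega

theorem chain_lev_small : ∀ (k : Nat) (l : List Char), l.length ≤ 2 →
    chain none (lev k l) = true := by
  intro k
  induction k with
  | zero =>
    intro l h
    exact chain_none_small _ (evens_small l h)
  | succ k ih =>
    intro l h
    exact ih (odds l) (odds_small l h)

theorem odds_length_lt (l : List Char) (h : 0 < l.length) : (odds l).length < l.length := by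
  have h1 : (evens l.tail).length ≤ l.tail.length := by
    generalize l.tail = t
    induction t using evens.induct with
    | case1 => simp [evens]
    | case2 c => simp [evens]
    | case3 c d rest ih => simp [evens]; omega
  have h2 : l.tail.length = l.length - 1 := by simp [List.length_tail]
  show (evens l.tail).length < l.length
  omega

theorem checkTodo_iff (l : List Char) :
    checkTodo l = true ↔ ∀ k, chain none (lev k l) = true := by
  suffices H : ∀ (n : Nat) (l : List Char), l.length ≤ n →
      (checkTodo l = true ↔ ∀ k, chain none (lev k l) = true) from H l.length l le_rfl
  intro n
  induction n with
  | zero =>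
    intro l hl
    rw [checkTodo, dif_neg (by omega)]
    have hnil : l = [] := List.eq_nil_of_length_eq_zero (by omega)
    subst hnil
    simp only [true_iff]
    intro k
    exact chain_lev_small k [] (by simp)
  | succ n ih =>
    intro l hl
    rw [checkTodo]
    by_cases h3 : 3 ≤ l.length
    · rw [dif_pos h3]
      rw [show PySem.List.pyRange 2 ((l.length : Int)) 2
            = PySem.List.pyRange (((2 : Nat) : Int)) ((l.length : Int)) 2 from by norm_num,
          innerAny_eq l.length l 2 (by omega) le_rfl, List.drop_zero]
      rw [PySem.List.foldl_append_singleton_eq_map (fun i => PySem.List.pyGetD l i ' '),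
          List.nil_append,
          show PySem.List.pyRange 1 ((l.length : Int)) 2
            = PySem.List.pyRange (((1 : Nat) : Int)) ((l.length : Int)) 2 from by norm_num,
          map_pyRange_evens l.length l 1 (by omega),
          ← odds_eq_evens_drop]
      cases hc : chain none (evens l) with
      | false =>
        simp only [Bool.not_false, if_pos]
        constructor
        · intro hfalse; exact absurd hfalse (by simp)
        · intro hall
          have := hall 0
          rw [show lev 0 l = evens l from rfl, hc] at this
          simp at this
      | true =>
        simp only [Bool.not_true, Bool.false_eq_true, if_false]
        rw [ih (odds l) (by have := odds_length_lt l (by omega); omega)]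
        constructor
        · intro h1 k
          cases k with
          | zero => exact hc
          | succ k => exact h1 k
        · intro h1 k
          exact h1 (k + 1)
    · rw [dif_neg h3]
      simp only [true_iff]
      intro k
      exact chain_lev_small k l (by omega)

-- ===== VERDICT (by name: the statement is the Claim_ definition above) =====
theorem check_spec : Claim_equal_check := by
  intro s _
  show check s = check_alt s
  have hA := checkTodo_iff s.toList
  have hB : check_alt s = true ↔ ∀ k, chain none (lev k s.toList) = true := by
    unfold check_alt
    rw [altLoop_iff]
    apply forall_congr'
    intro k
    rw [PySem.Dict.get?_empty, L_eq_lev]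
  have h : check s = true ↔ check_alt s = true := by
    rw [show check s = checkTodo s.toList from rfl, hA, hB]
  cases h1 : check s <;> cases h2 : check_alt s <;> simp_all
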